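-- pv_equiv track=rewrite | github.com/wavce/classificationx | models/shufflenet_v1.py | _get_weight_name_map
-- ===== SOURCE A (Python) =====
-- def _get_weight_name_map(blocks):
--     name_map = {
--         "first_conv/conv2d/kernel:0":               "module.first_conv.0.weight",
--         "first_conv/batch_norm/gamma:0":            "module.first_conv.1.weight",
--         "first_conv/batch_norm/beta:0":             "module.first_conv.1.bias",
--         "first_conv/batch_norm/moving_mean:0":      "module.first_conv.1.running_mean",
--         "first_conv/batch_norm/moving_variance:0":  "module.first_conv.1.running_var",
--     }
--
--     idx = 0
--     for n in blocks:
--         for _ in range(n):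
--             m = {
--                 "%d/conv1/conv2d/kernel:0" % idx :               "module.features.%d.branch_main_1.0.weight" % idx,
--                 "%d/conv1/batch_norm/gamma:0" % idx:             "module.features.%d.branch_main_1.1.weight" % idx,
--                 "%d/conv1/batch_norm/beta:0" % idx:              "module.features.%d.branch_main_1.1.bias" % idx,
--                 "%d/conv1/batch_norm/moving_mean:0" % idx:       "module.features.%d.branch_main_1.1.running_mean" % idx,
--                 "%d/conv1/batch_norm/moving_variance:0" % idx:   "module.features.%d.branch_main_1.1.running_var" % idx,
--                 "%d/conv2/conv2d/depthwise_kernel:0" % idx:      "module.features.%d.branch_main_1.3.weight" % idx,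
--                 "%d/conv2/batch_norm/gamma:0" % idx:             "module.features.%d.branch_main_1.4.weight" % idx,
--                 "%d/conv2/batch_norm/beta:0" % idx:              "module.features.%d.branch_main_1.4.bias" % idx,
--                 "%d/conv2/batch_norm/moving_mean:0" % idx:       "module.features.%d.branch_main_1.4.running_mean" % idx,
--                 "%d/conv2/batch_norm/moving_variance:0" % idx:   "module.features.%d.branch_main_1.4.running_var" % idx,
--                 "%d/conv3/conv2d/kernel:0" % idx:                "module.features.%d.branch_main_2.0.weight" % idx,
--                 "%d/conv3/batch_norm/gamma:0" % idx:             "module.features.%d.branch_main_2.1.weight" % idx,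
--                 "%d/conv3/batch_norm/beta:0" % idx:              "module.features.%d.branch_main_2.1.bias" % idx,
--                 "%d/conv3/batch_norm/moving_mean:0" % idx:       "module.features.%d.branch_main_2.1.running_mean" % idx,
--                 "%d/conv3/batch_norm/moving_variance:0" % idx:   "module.features.%d.branch_main_2.1.running_var" % idx,
--             }
--             name_map.update(m)
--             idx += 1
--
--     name_map["dense/kernel:0"] = "module.classifier.0.weight"
--
--     return name_map
-- ===== SOURCE B (Python) =====
-- _STAGES = [
--     ("conv1", "branch_main_1", 0, "kernel"),
--     ("conv2", "branch_main_1", 3, "depthwise_kernel"),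
--     ("conv3", "branch_main_2", 0, "kernel"),
-- ]
-- _BN = [
--     ("gamma", "weight"),
--     ("beta", "bias"),
--     ("moving_mean", "running_mean"),
--     ("moving_variance", "running_var"),
-- ]
--
--
-- def _layer_pairs(i):
--     pairs = []
--     for conv, branch, pos, kern in _STAGES:
--         pairs.append(("%d/%s/conv2d/%s:0" % (i, conv, kern),
--                       "module.features.%d.%s.%d.weight" % (i, branch, pos)))
--         for tf_name, pt_name in _BN:
--             pairs.append(("%d/%s/batch_norm/%s:0" % (i, conv, tf_name),
--                           "module.features.%d.%s.%d.%s" % (i, branch, pos + 1, pt_name)))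
--     return pairs
--
--
-- def _get_weight_name_map(blocks):
--     # global indices of the feature layers: block of size n occupies the
--     # next n consecutive indices
--     idxs = []
--     for n in blocks:
--         idxs += range(len(idxs), len(idxs) + n)
--
--     pairs = [
--         ("first_conv/conv2d/kernel:0",              "module.first_conv.0.weight"),
--         ("first_conv/batch_norm/gamma:0",           "module.first_conv.1.weight"),
--         ("first_conv/batch_norm/beta:0",            "module.first_conv.1.bias"),
--         ("first_conv/batch_norm/moving_mean:0",     "module.first_conv.1.running_mean"),
--         ("first_conv/batch_norm/moving_variance:0", "module.first_conv.1.running_var"),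
--     ]
--     pairs += [p for i in idxs for p in _layer_pairs(i)]
--     pairs.append(("dense/kernel:0", "module.classifier.0.weight"))
--     return dict(pairs)
-- ===== Notes on version B (the rewrite author's own statement) =====
-- stated objective: alternative
-- what changed: B first flattens the block counts into an explicit list of global layer indices, derives the 15 per-layer entries from a cross product of a 3-stage table and a 4-parameter batch-norm table instead of an inline 15-entry dict literal, and constructs the dict once from a single flat pair list, where A interleaves two nested loops that mutate the dict with a hand-written 15-entry literal per step.
import Mathlib
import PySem

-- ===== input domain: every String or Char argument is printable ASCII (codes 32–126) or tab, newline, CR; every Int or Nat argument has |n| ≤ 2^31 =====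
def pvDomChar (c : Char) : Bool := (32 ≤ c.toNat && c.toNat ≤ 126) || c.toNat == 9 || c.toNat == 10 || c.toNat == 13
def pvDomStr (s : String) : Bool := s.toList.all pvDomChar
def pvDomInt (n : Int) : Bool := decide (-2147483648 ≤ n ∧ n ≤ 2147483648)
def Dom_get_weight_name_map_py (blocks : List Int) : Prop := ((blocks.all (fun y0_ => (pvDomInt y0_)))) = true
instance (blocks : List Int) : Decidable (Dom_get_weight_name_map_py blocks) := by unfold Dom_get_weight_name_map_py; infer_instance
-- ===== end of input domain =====

-- B flattens the block counts into an explicit layer-index list, derives the 15 per-layer entries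
-- from a stages × batch-norm-params cross product, and builds the dict once from one flat pair
-- list, instead of A's nested loops mutating the dict with a 15-entry literal; equal return value.

-- ===== PORT A =====
-- the 15-pair dict literal A's inner loop builds for a given idx ("%d…" % idx), in source order
def aEntries (idx : Int) : List (String × String) :=
  let s := PySem.Int.toStr idx
  [ (s ++ "/conv1/conv2d/kernel:0",              "module.features." ++ s ++ ".branch_main_1.0.weight"),
    (s ++ "/conv1/batch_norm/gamma:0",           "module.features." ++ s ++ ".branch_main_1.1.weight"),
    (s ++ "/conv1/batch_norm/beta:0",            "module.features." ++ s ++ ".branch_main_1.1.bias"),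
    (s ++ "/conv1/batch_norm/moving_mean:0",     "module.features." ++ s ++ ".branch_main_1.1.running_mean"),
    (s ++ "/conv1/batch_norm/moving_variance:0", "module.features." ++ s ++ ".branch_main_1.1.running_var"),
    (s ++ "/conv2/conv2d/depthwise_kernel:0",    "module.features." ++ s ++ ".branch_main_1.3.weight"),
    (s ++ "/conv2/batch_norm/gamma:0",           "module.features." ++ s ++ ".branch_main_1.4.weight"),
    (s ++ "/conv2/batch_norm/beta:0",            "module.features." ++ s ++ ".branch_main_1.4.bias"),
    (s ++ "/conv2/batch_norm/moving_mean:0",     "module.features." ++ s ++ ".branch_main_1.4.running_mean"),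
    (s ++ "/conv2/batch_norm/moving_variance:0", "module.features." ++ s ++ ".branch_main_1.4.running_var"),
    (s ++ "/conv3/conv2d/kernel:0",              "module.features." ++ s ++ ".branch_main_2.0.weight"),
    (s ++ "/conv3/batch_norm/gamma:0",           "module.features." ++ s ++ ".branch_main_2.1.weight"),
    (s ++ "/conv3/batch_norm/beta:0",            "module.features." ++ s ++ ".branch_main_2.1.bias"),
    (s ++ "/conv3/batch_norm/moving_mean:0",     "module.features." ++ s ++ ".branch_main_2.1.running_mean"),
    (s ++ "/conv3/batch_norm/moving_variance:0", "module.features." ++ s ++ ".branch_main_2.1.running_var")]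

def get_weight_name_map_py (blocks : List Int) : List (String × String) :=
  let name_map : PySem.Dict String String := PySem.Dict.ofList
    [ ("first_conv/conv2d/kernel:0",              "module.first_conv.0.weight"),
      ("first_conv/batch_norm/gamma:0",           "module.first_conv.1.weight"),
      ("first_conv/batch_norm/beta:0",            "module.first_conv.1.bias"),
      ("first_conv/batch_norm/moving_mean:0",     "module.first_conv.1.running_mean"),
      ("first_conv/batch_norm/moving_variance:0", "module.first_conv.1.running_var")]
  -- idx = 0; for n in blocks: for _ in range(n): name_map.update(m); idx += 1
  let st := blocks.foldl
    (fun (st : PySem.Dict String String × Int) n =>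
      (PySem.List.pyRange 0 n 1).foldl
        (fun st _ => (st.1.update (aEntries st.2), st.2 + 1)) st)
    (name_map, 0)
  ((st.1).insert "dense/kernel:0" "module.classifier.0.weight").items

-- ===== PORT B =====
def bStages : List (String × String × Int × String) :=
  [ ("conv1", "branch_main_1", 0, "kernel"),
    ("conv2", "branch_main_1", 3, "depthwise_kernel"),
    ("conv3", "branch_main_2", 0, "kernel")]

def bBN : List (String × String) :=
  [ ("gamma", "weight"),
    ("beta", "bias"),
    ("moving_mean", "running_mean"),
    ("moving_variance", "running_var")]

-- _layer_pairs(i): the kernel entry plus four batch-norm entries for each of the three stages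
def layerPairs (i : Int) : List (String × String) :=
  bStages.foldl
    (fun pairs st =>
      let conv := st.1; let branch := st.2.1; let pos := st.2.2.1; let kern := st.2.2.2
      let pairs := pairs ++
        [(PySem.Int.toStr i ++ "/" ++ conv ++ "/conv2d/" ++ kern ++ ":0",
          "module.features." ++ PySem.Int.toStr i ++ "." ++ branch ++ "." ++ PySem.Int.toStr pos ++ ".weight")]
      bBN.foldl
        (fun pairs p =>
          pairs ++
            [(PySem.Int.toStr i ++ "/" ++ conv ++ "/batch_norm/" ++ p.1 ++ ":0",
              "module.features." ++ PySem.Int.toStr i ++ "." ++ branch ++ "." ++ PySem.Int.toStr (pos + 1) ++ "." ++ p.2)])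
        pairs)
    []

def get_weight_name_map_py_alt (blocks : List Int) : List (String × String) :=
  -- idxs = []; for n in blocks: idxs += range(len(idxs), len(idxs) + n)
  let idxs := blocks.foldl
    (fun (idxs : List Int) n =>
      idxs ++ PySem.List.pyRange (idxs.length : Int) ((idxs.length : Int) + n) 1) []
  let pairs : List (String × String) :=
    [ ("first_conv/conv2d/kernel:0",              "module.first_conv.0.weight"),
      ("first_conv/batch_norm/gamma:0",           "module.first_conv.1.weight"),
      ("first_conv/batch_norm/beta:0",            "module.first_conv.1.bias"),
      ("first_conv/batch_norm/moving_mean:0",     "module.first_conv.1.running_mean"),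
      ("first_conv/batch_norm/moving_variance:0", "module.first_conv.1.running_var")]
  let pairs := pairs ++ idxs.flatMap (fun i => layerPairs i)
  let pairs := pairs ++ [("dense/kernel:0", "module.classifier.0.weight")]
  (PySem.Dict.ofList pairs).items

-- ===== PRECONDITION & SPEC =====
def Spec_get_weight_name_map_py (blocks : List Int) (out : List (String × String)) : Prop := out = get_weight_name_map_py_alt blocks
instance (blocks : List Int) (out : List (String × String)) : Decidable (Spec_get_weight_name_map_py blocks out) := by unfold Spec_get_weight_name_map_py; infer_instance

-- ===== CLAIM (what is proved, stated in full; the proofs are below) =====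
def Claim_equal_get_weight_name_map_py : Prop := ∀ (blocks : List Int), Dom_get_weight_name_map_py blocks → Spec_get_weight_name_map_py blocks (get_weight_name_map_py blocks)

-- ===== LEMMAS AND PROOFS =====

-- B's cross product generates exactly A's 15-entry list for a layer
theorem layerPairs_eq (i : Int) : layerPairs i = aEntries i := by
  simp only [layerPairs, aEntries, bStages, bBN, List.foldl_cons, List.foldl_nil,
    List.nil_append, List.append_assoc, List.cons_append,
    List.cons.injEq, Prod.mk.injEq, String.append_assoc]
  repeat' apply And.intro
  all_goals repeat' apply congrArg
  all_goals decide

-- A's inner 'for _ in range(n)' loop over any driving list applies the per-idx update once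
-- per element, at consecutive indices
theorem inner_loop_eq (l : List Int) (d : PySem.Dict String String) (i : Int) :
    l.foldl (fun (st : PySem.Dict String String × Int) _ => (st.1.update (aEntries st.2), st.2 + 1)) (d, i)
    = ((PySem.List.pyRange i (i + l.length) 1).foldl (fun d j => d.update (aEntries j)) d,
       i + l.length) := by
  induction l generalizing d i with
  | nil => simp [PySem.List.pyRange_one_eq_nil (le_refl i)]
  | cons x xs ih =>
      have h : i < i + ((x :: xs).length : Int) := by
        simp only [List.length_cons]; push_cast; omega
      rw [PySem.List.pyRange_one_cons h]
      simp only [List.foldl_cons, ih]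
      rw [show i + 1 + ((xs.length : Int)) = i + (((x :: xs).length : Int)) by
        simp only [List.length_cons]; push_cast; ring]

theorem sum_max_nonneg (bs : List Int) : 0 ≤ ((bs.map (fun n => max n 0)).sum) := by
  induction bs with
  | nil => simp
  | cons x xs ih => simp only [List.map_cons, List.sum_cons]; positivity

-- A's outer loop equals a fold of per-index updates over the whole index range
theorem outer_loop_eq (bs : List Int) (d : PySem.Dict String String) (i : Int) :
    bs.foldl
      (fun (st : PySem.Dict String String × Int) n =>
        (PySem.List.pyRange 0 n 1).foldl
          (fun st _ => (st.1.update (aEntries st.2), st.2 + 1)) st)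
      (d, i)
    = ((PySem.List.pyRange i (i + (bs.map (fun n => max n 0)).sum) 1).foldl
         (fun d j => d.update (aEntries j)) d,
       i + (bs.map (fun n => max n 0)).sum) := by
  induction bs generalizing d i with
  | nil => simp [PySem.List.pyRange_one_eq_nil (le_refl i)]
  | cons n ns ih =>
      have hm : ((PySem.List.pyRange 0 n 1).length : Int) = max n 0 := by
        rw [PySem.List.length_pyRange_one]
        simp
      have h0 : (0:Int) ≤ max n 0 := le_max_right _ _
      have hs : (0:Int) ≤ (ns.map (fun n => max n 0)).sum := sum_max_nonneg ns
      rw [List.foldl_cons, inner_loop_eq, hm, ih]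
      have hsplit : PySem.List.pyRange i (i + ((n :: ns).map (fun n => max n 0)).sum) 1
          = PySem.List.pyRange i (i + max n 0) 1
            ++ PySem.List.pyRange (i + max n 0) (i + max n 0 + (ns.map (fun n => max n 0)).sum) 1 := by
        have := PySem.List.pyRange_one_append i (i + max n 0)
          (i + max n 0 + (ns.map (fun n => max n 0)).sum) (by omega) (by omega)
        rw [List.map_cons, List.sum_cons]
        rw [show i + (max n 0 + (ns.map (fun n => max n 0)).sum)
              = i + max n 0 + (ns.map (fun n => max n 0)).sum by ring]
        exact this
      rw [hsplit, List.foldl_append,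
        show i + max n 0 + (List.map (fun n => max n 0) ns).sum
            = i + (List.map (fun n => max n 0) (n :: ns)).sum by
          simp only [List.map_cons, List.sum_cons]; ring]

-- a fold of dict updates is one update with the concatenated pair list
theorem foldl_update_eq_update_flatMap (r : List Int) (d : PySem.Dict String String) :
    r.foldl (fun d j => d.update (aEntries j)) d = d.update (r.flatMap aEntries) := by
  induction r generalizing d with
  | nil => rfl
  | cons j r ih =>
      simp only [List.foldl_cons, List.flatMap_cons, ih]
      show _ = (List.foldl _ d (aEntries j ++ r.flatMap aEntries))
      rw [List.foldl_append]
      rfl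

-- an empty-for-nonpositive range: range(L, L+n) lists the next max(n,0) indices
theorem pyRange_add_max (a n : Int) :
    PySem.List.pyRange a (a + n) 1 = PySem.List.pyRange a (a + max n 0) 1 := by
  by_cases h : 0 ≤ n
  · rw [max_eq_left h]
  · rw [PySem.List.pyRange_one_eq_nil (by omega), max_eq_right (by omega),
      PySem.List.pyRange_one_eq_nil (by omega)]

-- B's index-list loop builds the contiguous range of all layer indices
theorem idxs_eq (bs : List Int) (acc : List Int) :
    bs.foldl (fun (idxs : List Int) n =>
        idxs ++ PySem.List.pyRange (idxs.length : Int) ((idxs.length : Int) + n) 1) acc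
    = acc ++ PySem.List.pyRange (acc.length : Int)
        ((acc.length : Int) + (bs.map (fun n => max n 0)).sum) 1 := by
  induction bs generalizing acc with
  | nil => simp [PySem.List.pyRange_one_eq_nil (le_refl ((acc.length : Int)))]
  | cons n ns ih =>
      simp only [List.foldl_cons]
      rw [ih, pyRange_add_max]
      have hlen : (((acc ++ PySem.List.pyRange (acc.length : Int) ((acc.length : Int) + max n 0) 1).length : Int))
          = (acc.length : Int) + max n 0 := by
        rw [List.length_append, PySem.List.length_pyRange_one]
        push_cast
        omega
      rw [hlen, List.append_assoc]
      congr 1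
      have h0 : (0:Int) ≤ max n 0 := le_max_right _ _
      have hs : (0:Int) ≤ (ns.map (fun n => max n 0)).sum := sum_max_nonneg ns
      rw [← PySem.List.pyRange_one_append ((acc.length : Int)) ((acc.length : Int) + max n 0)
            ((acc.length : Int) + max n 0 + (ns.map (fun n => max n 0)).sum) (by omega) (by omega)]
      congr 1
      simp only [List.map_cons, List.sum_cons]
      ring

-- ===== VERDICT (by name: the statement is the Claim_ definition above) =====
theorem get_weight_name_map_py_spec : Claim_equal_get_weight_name_map_py := by
  intro blocks _
  unfold Spec_get_weight_name_map_py get_weight_name_map_py get_weight_name_map_py_alt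
  dsimp only
  rw [outer_loop_eq, idxs_eq, foldl_update_eq_update_flatMap]
  simp only [List.nil_append, List.length_nil, Nat.cast_zero, zero_add]
  have hlp : (fun i => layerPairs i) = aEntries := by
    funext i; exact layerPairs_eq i
  rw [hlp]
  -- ofList (l1 ++ flat ++ [dense]) = ((ofList l1).update flat).insert dense (all folds of insert)
  show _ = (PySem.Dict.ofList (_ ++ _ ++ _)).items
  rw [show ∀ (l1 l2 l3 : List (String × String)),
        PySem.Dict.ofList (l1 ++ l2 ++ l3)
          = ((PySem.Dict.ofList l1).update l2).update l3 from
      fun l1 l2 l3 => by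
        show List.foldl _ _ (l1 ++ l2 ++ l3) = _
        rw [List.foldl_append, List.foldl_append]; rfl]
  rfl
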